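-- pv_equiv track=rewrite | github.com/korvus81/aoc2023 | day10/p10b.py | cleanmap
-- ===== SOURCE A (Python) =====
-- def cleanmap(mapin,seen_positions):
--     cleanmap = []
--     for row,l in enumerate(mapin):
--         currow = ""
--         for col,ch in enumerate(l):
--             if (row,col) in seen_positions:
--                 currow = currow + ch
--             else:
--                 currow = currow + "."
--         cleanmap.append(currow)
--     return cleanmap
-- ===== SOURCE B (Python) =====
-- def cleanmap(mapin, seen_positions):
--     grid = [['.'] * len(row) for row in mapin]
--     nrows = len(mapin)
--     for (r, c) in seen_positions:
--         if 0 <= r < nrows and 0 <= c < len(mapin[r]):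
--             grid[r][c] = mapin[r][c]
--     return [''.join(row) for row in grid]
-- ===== Notes on version B (the rewrite author's own statement) =====
-- stated objective: alternative
-- what changed: B pre-builds an all-dots grid and scatters only the in-bounds seen positions into it, instead of scanning every cell and searching seen_positions for each one.
import Mathlib
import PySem

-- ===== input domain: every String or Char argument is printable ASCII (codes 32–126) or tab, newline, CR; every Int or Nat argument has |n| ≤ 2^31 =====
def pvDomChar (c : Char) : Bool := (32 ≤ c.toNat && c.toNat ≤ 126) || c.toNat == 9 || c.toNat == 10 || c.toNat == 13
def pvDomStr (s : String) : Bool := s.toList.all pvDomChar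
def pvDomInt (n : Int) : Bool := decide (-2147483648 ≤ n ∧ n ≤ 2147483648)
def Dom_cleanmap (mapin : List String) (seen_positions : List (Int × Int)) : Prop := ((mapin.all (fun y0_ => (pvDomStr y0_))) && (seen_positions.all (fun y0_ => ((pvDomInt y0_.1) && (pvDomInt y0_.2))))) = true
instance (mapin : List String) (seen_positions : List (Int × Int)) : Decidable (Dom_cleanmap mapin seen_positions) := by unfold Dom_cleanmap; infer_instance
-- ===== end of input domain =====

-- B pre-builds an all-dots grid and scatters the in-bounds seen positions into it,
-- instead of scanning every cell and searching seen_positions for each (objective: alternative).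

-- ===== PORT A =====
-- inner loop of A: build the row string char by char
def cleanmapRow (seen_positions : List (Int × Int)) (row : Int) (l : List Char) : List Char :=
  (PySem.List.enumerate l).foldl
    (fun currow p => if (row, p.1) ∈ seen_positions then currow ++ [p.2] else currow ++ ['.'])
    []

def cleanmap (mapin : List String) (seen_positions : List (Int × Int)) : List String :=
  (PySem.List.enumerate mapin).foldl
    (fun acc p => acc ++ [String.mk (cleanmapRow seen_positions p.1 p.2.toList)])
    []

-- ===== PORT B =====
-- B's guarded single-cell write: if (r,c) is in bounds, set grid[r][c] = mapin[r][c]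
def bSetCell (rows : List (List Char)) (g : List (List Char)) (r c : Int) : List (List Char) :=
  if 0 ≤ r ∧ r < (rows.length : Int) ∧ 0 ≤ c ∧ c < ((rows.getD r.toNat []).length : Int) then
    g.modify r.toNat (fun row => row.set c.toNat ((rows.getD r.toNat []).getD c.toNat '.'))
  else g

def cleanmap_alt (mapin : List String) (seen_positions : List (Int × Int)) : List String :=
  let rows := mapin.map String.toList
  let grid := rows.map (fun l => List.replicate l.length '.')
  (seen_positions.foldl (fun g p => bSetCell rows g p.1 p.2) grid).map String.mk

-- ===== PRECONDITION & SPEC =====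
def Spec_cleanmap (mapin : List String) (seen_positions : List (Int × Int)) (out : List String) : Prop := out = cleanmap_alt mapin seen_positions
instance (mapin : List String) (seen_positions : List (Int × Int)) (out : List String) : Decidable (Spec_cleanmap mapin seen_positions out) := by unfold Spec_cleanmap; infer_instance

-- ===== CLAIM (what is proved, stated in full; the proofs are below) =====
def Claim_equal_cleanmap : Prop := ∀ (mapin : List String) (seen_positions : List (Int × Int)), Dom_cleanmap mapin seen_positions → Spec_cleanmap mapin seen_positions (cleanmap mapin seen_positions)

-- ===== LEMMAS AND PROOFS =====

-- canonical "gather" form both ports are reduced to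
def canonRow (seen : List (Int × Int)) (r : Int) (l : List Char) : List Char :=
  (List.range l.length).map (fun (j : Nat) => if (r, ((j : Nat) : Int)) ∈ seen then l.getD j '.' else '.')

def canon (rows : List (List Char)) (seen : List (Int × Int)) : List (List Char) :=
  (List.range rows.length).map (fun (i : Nat) => canonRow seen ((i : Nat) : Int) (rows.getD i []))

theorem getD_map' {α β : Type} (f : α → β) (l : List α) (n : Nat) (d : α) :
    (l.map f).getD n (f d) = f (l.getD n d) := by
  simp only [List.getD, List.getElem?_map]
  cases l[n]? <;> simp

theorem getD_range_self {α : Type} (l : List α) (d : α) :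
    (List.range l.length).map (fun j => l.getD j d) = l := by
  induction l with
  | nil => simp
  | cons x xs ih =>
    rw [List.length_cons, List.range_succ_eq_map]
    simp only [List.map_cons, List.map_map, List.getD_cons_zero]
    refine congrArg₂ _ rfl ?_
    simpa [Function.comp, List.getD_cons_succ] using ih

theorem getD_set' {α : Type} (l : List α) (k : Nat) (v : α) (j : Nat) (d : α) :
    (l.set k v).getD j d = if k = j ∧ j < l.length then v else l.getD j d := by
  simp only [List.getD, List.getElem?_set]
  by_cases hk : k = j
  · subst hk
    by_cases hl : k < l.length <;> simp [hl]
  · simp [hk]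

theorem getD_modify' {α : Type} (g : List α) (k : Nat) (f : α → α) (i : Nat) (d : α) :
    (g.modify k f).getD i d = if k = i ∧ i < g.length then f (g.getD i d) else g.getD i d := by
  simp only [List.getD, List.getElem?_modify]
  by_cases hk : k = i
  · subst hk
    by_cases hl : k < g.length
    · rw [List.getElem?_eq_getElem hl]
      simp [hl]
    · have hnone : g[k]? = none := List.getElem?_eq_none_iff.2 (by omega)
      simp [hl]
  · simp [hk]

theorem getD_replicate' {α : Type} (n : Nat) (a : α) (j : Nat) :
    (List.replicate n a).getD j a = a := by
  simp only [List.getD, List.getElem?_replicate]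
  split <;> rfl

theorem foldl_if_app (seen : List (Int × Int)) (r : Int) :
    ∀ (l : List (Int × Char)) (acc : List Char),
      l.foldl (fun currow p => if (r, p.1) ∈ seen then currow ++ [p.2] else currow ++ ['.']) acc
        = acc ++ l.map (fun p => if (r, p.1) ∈ seen then p.2 else '.') := by
  intro l
  induction l with
  | nil => simp
  | cons p rest ih =>
    intro acc
    simp only [List.foldl_cons, List.map_cons]
    by_cases h : (r, p.1) ∈ seen <;> simp [h, ih]

theorem foldl_app {α : Type} (f : Int × α → String) :
    ∀ (l : List (Int × α)) (acc : List String),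
      l.foldl (fun a p => a ++ [f p]) acc = acc ++ l.map f := by
  intro l
  induction l with
  | nil => simp
  | cons p rest ih => intro acc; simp [ih]

theorem enumerate_map {α γ : Type} (f : Int × α → γ) (d : α) :
    ∀ (l : List α) (s : Int),
      (PySem.List.enumerate l s).map f
        = (List.range l.length).map (fun (j : Nat) => f (s + ((j : Nat) : Int), l.getD j d)) := by
  intro l
  induction l with
  | nil => intro s; simp [PySem.List.enumerate_nil]
  | cons x xs ih =>
    intro s
    rw [PySem.List.enumerate_cons]
    simp only [List.map_cons, List.length_cons, List.range_succ_eq_map, List.map_map]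
    refine congrArg₂ _ ?_ ?_
    · simp
    · rw [ih (s + 1)]
      apply List.map_congr_left
      intro j _
      simp only [Function.comp_apply, List.getD_cons_succ]
      congr 2
      push_cast; ring

theorem cleanmapRow_eq (seen : List (Int × Int)) (r : Int) (l : List Char) :
    cleanmapRow seen r l = canonRow seen r l := by
  unfold cleanmapRow canonRow
  rw [foldl_if_app, List.nil_append,
      enumerate_map (fun p => if (r, p.1) ∈ seen then p.2 else '.') '.' l 0]
  apply List.map_congr_left
  intro j _
  simp

theorem cleanmap_eq_canon (mapin : List String) (seen : List (Int × Int)) :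
    cleanmap mapin seen = (canon (mapin.map String.toList) seen).map String.mk := by
  unfold cleanmap canon
  rw [foldl_app, List.nil_append,
      enumerate_map (fun p => String.mk (cleanmapRow seen p.1 p.2.toList)) "" mapin 0]
  simp only [List.map_map, List.length_map]
  apply List.map_congr_left
  intro i _
  simp only [Function.comp_apply, cleanmapRow_eq, zero_add]
  have h2 : (mapin.map String.toList).getD i [] = (mapin.getD i "").toList := by
    simp only [List.getD, List.getElem?_map]
    cases mapin[i]? <;> simp
  rw [h2]

theorem bSetCell_length (rows g : List (List Char)) (r c : Int) :
    (bSetCell rows g r c).length = g.length := by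
  unfold bSetCell; split <;> simp

theorem bSetCell_row_length (rows g : List (List Char)) (r c : Int) (i : Nat) :
    ((bSetCell rows g r c).getD i []).length = (g.getD i []).length := by
  unfold bSetCell
  split
  · rw [getD_modify']
    split <;> simp
  · rfl

theorem bSetCell_getD (rows g : List (List Char)) (r c : Int) (i j : Nat)
    (hg : g.length = rows.length)
    (hrow : ∀ k, (g.getD k []).length = (rows.getD k []).length)
    (hi : i < rows.length) (hj : j < (rows.getD i []).length) :
    ((bSetCell rows g r c).getD i []).getD j '.' =
      if r = (i : Int) ∧ c = (j : Int) then (rows.getD i []).getD j '.'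
      else (g.getD i []).getD j '.' := by
  unfold bSetCell
  split
  · rename_i hb
    obtain ⟨h0r, h1r, h0c, h1c⟩ := hb
    rw [getD_modify']
    by_cases hri : r.toNat = i
    · have hig : i < g.length := by omega
      rw [if_pos ⟨hri, hig⟩]
      simp only [hri]
      rw [getD_set']
      have hri' : r = (i : Int) := by omega
      by_cases hcj : c.toNat = j
      · have hcj' : c = (j : Int) := by omega
        have hjl : j < (g.getD i []).length := by rw [hrow]; exact hj
        rw [if_pos ⟨hcj, hjl⟩, if_pos ⟨hri', hcj'⟩, hcj]
      · have hcj' : ¬ c = (j : Int) := by omega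
        rw [if_neg (fun h => hcj h.1), if_neg (fun h => hcj' h.2)]
    · have hri' : ¬ r = (i : Int) := by omega
      rw [if_neg (fun h => hri h.1), if_neg (fun h => hri' h.1)]
  · rename_i hb
    have : ¬ (r = (i : Int) ∧ c = (j : Int)) := by
      rintro ⟨rfl, rfl⟩
      apply hb
      refine ⟨by omega, by omega, by omega, ?_⟩
      have : (i : Int).toNat = i := by omega
      rw [this]
      exact_mod_cast hj
    simp [this]

theorem fold_canon (rows : List (List Char)) :
    ∀ (seen : List (Int × Int)) (g : List (List Char)),
      g.length = rows.length →
      (∀ k, (g.getD k []).length = (rows.getD k []).length) →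
      seen.foldl (fun g p => bSetCell rows g p.1 p.2) g
        = (List.range rows.length).map (fun (i : Nat) =>
            (List.range (rows.getD i []).length).map (fun (j : Nat) =>
              if (((i : Nat) : Int), ((j : Nat) : Int)) ∈ seen then (rows.getD i []).getD j '.'
              else (g.getD i []).getD j '.')) := by
  intro seen
  induction seen with
  | nil =>
    intro g hg hrow
    simp only [List.foldl_nil, List.not_mem_nil, if_false]
    apply List.ext_getElem
    · simp [hg]
    · intro i hi hi'
      have hig : i < g.length := by simpa [hg] using by simpa using hi'
      have hd : g.getD i [] = g[i] := by
        simp [List.getD, List.getElem?_eq_getElem hig]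
      simp only [List.getElem_map, List.getElem_range]
      rw [← hrow i, hd, getD_range_self]
  | cons p rest ih =>
    intro g hg hrow
    rw [List.foldl_cons]
    rw [ih (bSetCell rows g p.1 p.2)
        (by rw [bSetCell_length, hg])
        (fun k => by rw [bSetCell_row_length]; exact hrow k)]
    apply List.map_congr_left
    intro i hi
    apply List.map_congr_left
    intro j hj
    rw [List.mem_range] at hi hj
    rw [bSetCell_getD rows g p.1 p.2 i j hg hrow hi hj]
    by_cases hmem : (((i : Nat) : Int), ((j : Nat) : Int)) ∈ rest
    · simp [hmem, List.mem_cons]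
    · have : (((i : Nat) : Int), ((j : Nat) : Int)) ∈ p :: rest ↔
          p.1 = (i : Int) ∧ p.2 = (j : Int) := by
        simp [List.mem_cons, hmem, Prod.ext_iff, eq_comm]
      simp [hmem, this]

theorem cleanmap_alt_eq_canon (mapin : List String) (seen : List (Int × Int)) :
    cleanmap_alt mapin seen = (canon (mapin.map String.toList) seen).map String.mk := by
  unfold cleanmap_alt canon canonRow
  dsimp only
  rw [fold_canon (mapin.map String.toList) seen
      ((mapin.map String.toList).map (fun l => List.replicate l.length '.'))
      (by simp)
      (fun k => by
        have : ((mapin.map String.toList).map (fun l => List.replicate l.length '.')).getD k []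
            = List.replicate ((mapin.map String.toList).getD k []).length '.' := by
          simpa using getD_map' (fun l => List.replicate l.length '.') (mapin.map String.toList) k []
        rw [this, List.length_replicate])]
  simp only [List.map_map]
  apply List.map_congr_left
  intro i _
  simp only [Function.comp_apply]
  congr 1
  apply List.map_congr_left
  intro j _
  have hdot : ((mapin.map ((fun l => List.replicate l.length '.') ∘ String.toList)).getD i []).getD j '.' = '.' := by
    have h1 : (mapin.map ((fun l => List.replicate l.length '.') ∘ String.toList)).getD i []
        = List.replicate (mapin.getD i "").toList.length '.' := by
      simp only [List.getD, List.getElem?_map]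
      cases mapin[i]? <;> simp
    rw [h1, getD_replicate']
  rw [hdot]

-- ===== VERDICT (by name: the statement is the Claim_ definition above) =====
theorem cleanmap_spec : Claim_equal_cleanmap := by
  intro mapin seen _
  unfold Spec_cleanmap
  rw [cleanmap_eq_canon, cleanmap_alt_eq_canon]
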